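-- pv_equiv track=rewrite | github.com/mblue-code/wakefromfar | backend/app/scheduled_wakes.py | normalize_days_of_week
-- ===== SOURCE A (Python) =====
-- DAY_ORDER = ("mon", "tue", "wed", "thu", "fri", "sat", "sun")
--
-- DAY_TO_WEEKDAY = {day: index for index, day in enumerate(DAY_ORDER)}
--
-- def normalize_days_of_week(days_of_week: list[str]) -> list[str]:
--     normalized: list[str] = []
--     seen: set[str] = set()
--     for raw_day in days_of_week:
--         day = str(raw_day).strip().lower()
--         if day not in DAY_TO_WEEKDAY:
--             raise ValueError("days_of_week must contain only mon,tue,wed,thu,fri,sat,sun")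
--         if day not in seen:
--             normalized.append(day)
--             seen.add(day)
--     if not normalized:
--         raise ValueError("days_of_week must contain at least one day")
--     return sorted(normalized, key=DAY_ORDER.index)
-- ===== SOURCE B (Python) =====
-- DAY_ORDER = ("mon", "tue", "wed", "thu", "fri", "sat", "sun")
--
-- def normalize_days_of_week(days_of_week: list[str]) -> list[str]:
--     present = [False] * 7
--     for raw_day in days_of_week:
--         day = str(raw_day).strip().lower()
--         try:
--             i = DAY_ORDER.index(day)
--         except ValueError:
--             raise ValueError("days_of_week must contain only mon,tue,wed,thu,fri,sat,sun")
--         present[i] = True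
--     if not any(present):
--         raise ValueError("days_of_week must contain at least one day")
--     return [day for day, p in zip(DAY_ORDER, present) if p]
-- ===== Notes on version B (the rewrite author's own statement) =====
-- stated objective: alternative
-- what changed: Replaces A's ordered dedup list + set + final sorted(key=DAY_ORDER.index) with a 7-slot presence array marked during the single validation pass, the result then read off by one scan of the fixed DAY_ORDER; no dedup list and no sort.
import Mathlib
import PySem

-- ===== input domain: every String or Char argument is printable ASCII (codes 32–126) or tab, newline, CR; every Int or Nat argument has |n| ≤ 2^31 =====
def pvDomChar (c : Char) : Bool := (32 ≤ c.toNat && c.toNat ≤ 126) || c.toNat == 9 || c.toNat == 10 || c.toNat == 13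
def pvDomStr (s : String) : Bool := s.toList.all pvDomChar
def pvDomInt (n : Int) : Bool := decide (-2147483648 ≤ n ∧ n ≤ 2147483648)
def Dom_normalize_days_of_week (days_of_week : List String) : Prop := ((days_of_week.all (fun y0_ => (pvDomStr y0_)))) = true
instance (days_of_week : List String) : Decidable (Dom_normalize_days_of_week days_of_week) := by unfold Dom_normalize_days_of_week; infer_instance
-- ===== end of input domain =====

-- B replaces A's dedup-list + sorted(key=DAY_ORDER.index) by a 7-slot presence array filled
-- during the validation pass and read off by one scan of the fixed DAY_ORDER (alternative decomposition).

-- ===== PORT A =====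
def pvDayOrder : List String := ["mon", "tue", "wed", "thu", "fri", "sat", "sun"]

def pvCanon (s : String) : String := PySem.Str.lower (PySem.Str.strip s)

-- DAY_ORDER.index day, the sort key; under Pre_ the index? is always some
def pvKey (s : String) : Nat := (PySem.List.index? pvDayOrder s).getD 7

-- A's loop body: validate (raise excluded by Pre_), then dedup-append into (normalized, seen)
def pvStepA (st : List String × PySem.Set String) (raw_day : String) : List String × PySem.Set String :=
  let day := pvCanon raw_day
  if day ∈ pvDayOrder then          -- 'day not in DAY_TO_WEEKDAY' raises ValueError: excluded by Pre_
    if PySem.Set.contains st.2 day then st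
    else (st.1 ++ [day], PySem.Set.add st.2 day)
  else st

def pvLoopA (days_of_week : List String) : List String × PySem.Set String :=
  days_of_week.foldl pvStepA ([], PySem.Set.empty)

def normalize_days_of_week (days_of_week : List String) : List String :=
  if (pvLoopA days_of_week).1 = [] then []   -- 'at least one day' ValueError: excluded by Pre_
  else PySem.List.sorted (pvLoopA days_of_week).1 pvKey false

-- ===== PORT B =====
-- B's loop body: canonicalize, DAY_ORDER.index (raise excluded by Pre_), mark the presence slot
def pvStepB (p : List Bool) (raw_day : String) : List Bool :=
  match PySem.List.index? pvDayOrder (pvCanon raw_day) with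
  | some i => p.set i true
  | none => p                        -- B's re-raised ValueError: excluded by Pre_

def pvLoopB (days_of_week : List String) : List Bool :=
  days_of_week.foldl pvStepB (List.replicate 7 false)

def normalize_days_of_week_alt (days_of_week : List String) : List String :=
  if (pvLoopB days_of_week).any id then
    ((pvDayOrder.zip (pvLoopB days_of_week)).filter (fun x => x.2)).map (fun x => x.1)
  else []                            -- 'at least one day' ValueError: excluded by Pre_

-- ===== PRECONDITION & SPEC =====
-- Pre_ = exactly the inputs where Python A returns: nonempty, and every entry canonicalizes to a weekday
def Pre_normalize_days_of_week (days_of_week : List String) : Prop :=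
  days_of_week ≠ [] ∧ ∀ s ∈ days_of_week, pvCanon s ∈ pvDayOrder
instance (days_of_week : List String) : Decidable (Pre_normalize_days_of_week days_of_week) := by
  unfold Pre_normalize_days_of_week; infer_instance

def pvWitness_normalize_days_of_week : List String := ["tue", "  Mon ", "tue", "sun"]

def Spec_normalize_days_of_week (days_of_week : List String) (out : List String) : Prop :=
  out = normalize_days_of_week_alt days_of_week
instance (days_of_week : List String) (out : List String) : Decidable (Spec_normalize_days_of_week days_of_week out) := by
  unfold Spec_normalize_days_of_week; infer_instance

-- ===== CLAIM (what is proved, stated in full; the proofs are below) =====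
def Claim_equal_normalize_days_of_week : Prop :=
  ∀ (days_of_week : List String), Dom_normalize_days_of_week days_of_week →
    Pre_normalize_days_of_week days_of_week →
    Spec_normalize_days_of_week days_of_week (normalize_days_of_week days_of_week)

-- ===== LEMMAS AND PROOFS =====

-- A's loop: when every day is valid, (normalized, seen) stays diagonal and accumulates Set.add
theorem pvFoldA (xs : List String) (acc : List String)
    (h : ∀ x ∈ xs, pvCanon x ∈ pvDayOrder) :
    xs.foldl pvStepA (acc, acc)
    = (PySem.Set.update acc (xs.map pvCanon), PySem.Set.update acc (xs.map pvCanon)) := by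
  induction xs generalizing acc with
  | nil => simp [PySem.Set.update]
  | cons x xs ih =>
    have hx : pvCanon x ∈ pvDayOrder := h x (List.mem_cons_self ..)
    have hrest : ∀ y ∈ xs, pvCanon y ∈ pvDayOrder := fun y hy => h y (List.mem_cons_of_mem _ hy)
    have hstep : pvStepA (acc, acc) x
        = (PySem.Set.add acc (pvCanon x), PySem.Set.add acc (pvCanon x)) := by
      by_cases hc : pvCanon x ∈ acc <;>
        simp [pvStepA, hx, PySem.Set.add, hc]
    rw [List.foldl_cons, hstep, ih _ hrest]
    simp [PySem.Set.update]

-- setting index i of (l.map f) to true, for nodup l, marks exactly the element l[i]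
theorem pvSetMap {α : Type} [DecidableEq α] (l : List α) (f : α → Bool) (i : Nat)
    (hi : i < l.length) (hnd : l.Nodup) :
    (l.map f).set i true = l.map (fun a => f a || decide (a = l[i])) := by
  induction l generalizing i with
  | nil => simp at hi
  | cons x xs ih =>
    rcases List.nodup_cons.mp hnd with ⟨hx, hxs⟩
    cases i with
    | zero =>
      simp only [List.map_cons, List.set_cons_zero, List.getElem_cons_zero]
      simp only [List.cons.injEq]
      refine ⟨by simp, (List.map_congr_left ?_).symm⟩
      intro a ha
      have hne : a ≠ x := fun h => hx (h ▸ ha)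
      simp [hne]
    | succ j =>
      have hj : j < xs.length := by simpa using hi
      have hne : x ≠ xs[j] := fun h => hx (h ▸ xs.getElem_mem hj)
      simp only [List.map_cons, List.set_cons_succ, List.getElem_cons_succ]
      rw [ih j hj hxs]
      simp only [List.cons.injEq]
      exact ⟨by simp [hne], rfl⟩

-- B's loop maintains present = pvDayOrder.map (membership in the canonicalized prefix)
theorem pvFoldB (xs : List String) (acc : List String)
    (h : ∀ x ∈ xs, pvCanon x ∈ pvDayOrder) :
    xs.foldl pvStepB (pvDayOrder.map (fun a => decide (a ∈ acc)))
    = pvDayOrder.map (fun a => decide (a ∈ acc ++ xs.map pvCanon)) := by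
  induction xs generalizing acc with
  | nil => simp
  | cons x xs ih =>
    have hx : pvCanon x ∈ pvDayOrder := h x (List.mem_cons_self ..)
    have hrest : ∀ y ∈ xs, pvCanon y ∈ pvDayOrder := fun y hy => h y (List.mem_cons_of_mem _ hy)
    cases hidx : PySem.List.index? pvDayOrder (pvCanon x) with
    | none => exact absurd hx ((PySem.List.index?_eq_none_iff _ _).mp hidx)
    | some i =>
      obtain ⟨hlt, hget, -⟩ := PySem.List.getElem_of_index?_eq_some hidx
      have hstep : pvStepB (pvDayOrder.map (fun a => decide (a ∈ acc))) x
          = pvDayOrder.map (fun a => decide (a ∈ acc ++ [pvCanon x])) := by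
        simp only [pvStepB, hidx]
        rw [pvSetMap pvDayOrder _ i hlt (by decide), hget]
        apply List.map_congr_left
        intro a _
        simp [List.mem_append]
      rw [List.foldl_cons, hstep, ih _ hrest]
      simp

-- reading the presence row back along pvDayOrder is a filter
theorem pvZipFilter {α : Type} (l : List α) (f : α → Bool) :
    ((l.zip (l.map f)).filter (fun x => x.2)).map (fun x => x.1) = l.filter f := by
  induction l with
  | nil => rfl
  | cons x xs ih =>
    by_cases hx : f x <;> simp [hx, ih]

-- A's final sort equals the fixed-order filter
theorem pvSortedEqFilter (ys : List String) (h : ∀ y ∈ ys, y ∈ pvDayOrder) :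
    PySem.List.sorted (PySem.Set.ofList ys) pvKey false
      = pvDayOrder.filter (fun a => decide (a ∈ ys)) := by
  apply PySem.List.sorted_eq_of_perm_of_pairwise_lt
  · apply (List.perm_ext_iff_of_nodup ?_ ?_).mpr
    · intro a
      simp only [List.mem_filter, decide_eq_true_eq, PySem.Set.mem_ofList]
      exact ⟨fun ⟨_, ha⟩ => ha, fun ha => ⟨h a ha, ha⟩⟩
    · exact List.Nodup.filter _ (by decide)
    · exact PySem.Set.nodup_ofList ys
  · have hp : pvDayOrder.Pairwise (fun a b => pvKey a < pvKey b) := by decide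
    exact List.Pairwise.sublist List.filter_sublist hp

theorem pvLoopA_eq (days : List String) (h : ∀ x ∈ days, pvCanon x ∈ pvDayOrder) :
    pvLoopA days = (PySem.Set.ofList (days.map pvCanon), PySem.Set.ofList (days.map pvCanon)) :=
  pvFoldA days [] h

theorem pvLoopB_eq (days : List String) (h : ∀ x ∈ days, pvCanon x ∈ pvDayOrder) :
    pvLoopB days = pvDayOrder.map (fun a => decide (a ∈ days.map pvCanon)) := by
  have hb := pvFoldB days [] h
  simpa [pvLoopB] using hb

-- ===== VERDICT (by name: the statement is the Claim_ definition above) =====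
theorem normalize_days_of_week_spec : Claim_equal_normalize_days_of_week := by
  intro days _ hpre
  obtain ⟨hne, hval⟩ := hpre
  unfold Spec_normalize_days_of_week normalize_days_of_week normalize_days_of_week_alt
  rw [pvLoopA_eq days hval, pvLoopB_eq days hval]
  set ys := days.map pvCanon with hys
  have hysval : ∀ y ∈ ys, y ∈ pvDayOrder := by
    intro y hy; obtain ⟨x, hx, rfl⟩ := List.mem_map.mp hy; exact hval x hx
  have hysne : ys ≠ [] := by
    cases days with
    | nil => exact absurd rfl hne
    | cons a l => simp [hys]
  obtain ⟨y0, hy0⟩ := List.exists_mem_of_ne_nil ys hysne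
  have hAne : PySem.Set.ofList ys ≠ [] := by
    intro hcon
    have := (PySem.Set.mem_ofList ys y0).mpr hy0
    rw [hcon] at this; simp at this
  have hBany : (pvDayOrder.map (fun a => decide (a ∈ ys))).any id = true := by
    simp only [List.any_map, List.any_eq_true]
    exact ⟨y0, hysval y0 hy0, by simpa using hy0⟩
  rw [if_neg hAne, if_pos hBany, pvZipFilter, pvSortedEqFilter ys hysval]
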